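-- pv_equiv track=rewrite | github.com/project-cemetery/stepik-programming-on-python | week2/2.06 tasks of the week/step08 seq.py | get_strange_sequence
-- ===== SOURCE A (Python) =====
-- def get_strange_sequence(length):
--     sequence = []
--     for i in range(1, length + 1):
--         for j in range(i):
--             sequence.append(i)
--             if len(sequence) == length:
--                 break
--         else:
--             continue
--         break
--
--     return sequence
-- ===== SOURCE B (Python) =====
-- def get_strange_sequence(length):
--     result = []
--     i = 1
--     for p in range(length):
--         if i * (i + 1) < 2 * (p + 1):
--             i += 1
--         result.append(i)
--     return result
-- ===== Notes on version B (the rewrite author's own statement) =====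
-- stated objective: simpler
-- what changed: Replaces A's nested block loops (for each i append i up to i times, with break/for-else/continue control flow) by a single flat loop over positions that keeps the current value i and bumps it when the triangular bound i*(i+1) < 2*(p+1) is passed.
import Mathlib
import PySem

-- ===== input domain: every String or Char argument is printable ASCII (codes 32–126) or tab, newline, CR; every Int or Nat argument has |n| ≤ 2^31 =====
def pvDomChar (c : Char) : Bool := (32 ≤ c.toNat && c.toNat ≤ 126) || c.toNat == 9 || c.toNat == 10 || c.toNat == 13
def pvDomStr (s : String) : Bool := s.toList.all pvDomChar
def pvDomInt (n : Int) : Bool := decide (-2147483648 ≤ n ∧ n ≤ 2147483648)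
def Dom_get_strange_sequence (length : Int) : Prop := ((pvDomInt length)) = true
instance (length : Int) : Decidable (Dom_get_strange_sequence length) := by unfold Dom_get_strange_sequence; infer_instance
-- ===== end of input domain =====

-- B replaces A's nested block loops (append i, i times, with break/else) by a single pass
-- over positions that maintains the current value and bumps it by a triangular-number test
-- (objective: simpler).

-- ===== PORT A =====
-- inner 'for j in range(i): append; if len == length: break' — returns (sequence, broke?)
def pvAInner (length i : Int) : List Int → List Int → List Int × Bool
  | [], seq => (seq, false)
  | _ :: js, seq =>
      let seq' := seq ++ [i]
      if (seq'.length : Int) = length then (seq', true)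
      else pvAInner length i js seq'

-- outer 'for i in range(1, length+1)' with the for/else/continue/break pattern
def pvAOuter (length : Int) : List Int → List Int → List Int
  | [], seq => seq
  | i :: is, seq =>
      match pvAInner length i (PySem.List.pyRange 0 i 1) seq with
      | (seq', true) => seq'
      | (seq', false) => pvAOuter length is seq'

def get_strange_sequence (length : Int) : List Int :=
  pvAOuter length (PySem.List.pyRange 1 (length + 1) 1) []

-- ===== PORT B =====
-- single loop 'for p in range(length)' carrying (result, i)
def pvBGo : List Int → List Int → Int → List Int
  | [], res, _ => res
  | p :: ps, res, i =>
      let i' := if i * (i + 1) < 2 * (p + 1) then i + 1 else i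
      pvBGo ps (res ++ [i']) i'

def get_strange_sequence_alt (length : Int) : List Int :=
  pvBGo (PySem.List.pyRange 0 length 1) [] 1

-- ===== PRECONDITION & SPEC =====
def Spec_get_strange_sequence (length : Int) (out : List Int) : Prop := out = get_strange_sequence_alt length
instance (length : Int) (out : List Int) : Decidable (Spec_get_strange_sequence length out) := by unfold Spec_get_strange_sequence; infer_instance

-- ===== CLAIM (what is proved, stated in full; the proofs are below) =====
def Claim_equal_get_strange_sequence : Prop := ∀ (length : Int), Dom_get_strange_sequence length → Spec_get_strange_sequence length (get_strange_sequence length)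

-- ===== LEMMAS AND PROOFS =====

-- g m = the value at 1-based position m (smallest i with i*(i+1) ≥ 2*m; g 0 = 1 by convention)
def pvG : Nat → Nat
  | 0 => 1
  | m + 1 => if pvG m * (pvG m + 1) < 2 * (m + 1) then pvG m + 1 else pvG m

-- the intended sequence of length n
def pvF : Nat → List Int
  | 0 => []
  | n + 1 => pvF n ++ [(pvG (n + 1) : Int)]

-- triangular numbers
def pvT : Nat → Nat
  | 0 => 0
  | k + 1 => pvT k + (k + 1)

lemma pvG_pos (m : Nat) : 1 ≤ pvG m := by
  induction m with
  | zero => simp [pvG]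
  | succ m ih => simp only [pvG]; split <;> omega

lemma pvG_char (m : Nat) : 2 * m ≤ pvG m * (pvG m + 1) ∧ (m = 0 ∨ (pvG m - 1) * pvG m < 2 * m) := by
  induction m with
  | zero => simp [pvG]
  | succ m ih =>
    have hp := pvG_pos m
    simp only [pvG]
    split
    · rename_i h
      constructor
      · nlinarith [ih.1]
      · right; have : pvG m + 1 - 1 = pvG m := by omega
        rw [this]; omega
    · rename_i h
      constructor
      · omega
      · right
        rcases ih.2 with h0 | hlt
        · subst h0; decide
        · omega

lemma pvG_eq_of (i m : Nat) (hi : 1 ≤ i) (h1 : (i - 1) * i < 2 * m) (h2 : 2 * m ≤ i * (i + 1)) :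
    pvG m = i := by
  obtain ⟨hc1, hc2⟩ := pvG_char m
  have hp := pvG_pos m
  set a := pvG m with ha
  rcases hc2 with h0 | hlt
  · omega
  · by_contra hne
    rcases Nat.lt_or_ge a i with h | h
    · have : a * (a + 1) ≤ (i - 1) * i := by
        have : a + 1 ≤ i := by omega
        have : a ≤ i - 1 := by omega
        nlinarith
      omega
    · have hgt : i < a := by omega
      have : i * (i + 1) ≤ (a - 1) * a := by
        have h1' : i ≤ a - 1 := by omega
        have h2' : i + 1 ≤ a := by omega
        nlinarith
      omega

lemma pvT_double (k : Nat) : 2 * pvT k = k * (k + 1) := by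
  induction k with
  | zero => simp [pvT]
  | succ k ih => simp only [pvT]; nlinarith

lemma pvT_ge (k : Nat) : k ≤ pvT k := by
  induction k with
  | zero => simp [pvT]
  | succ k ih => simp only [pvT]; omega

-- positions T k < m ≤ T (k+1) carry value k+1
lemma pvG_block (k s : Nat) (h1 : pvT k ≤ s) (h2 : s + 1 ≤ pvT (k + 1)) :
    pvG (s + 1) = k + 1 := by
  apply pvG_eq_of (k + 1) (s + 1) (by omega)
  · have := pvT_double k; simp only [Nat.add_sub_cancel]; omega
  · have := pvT_double (k + 1); omega

lemma pvF_length (n : Nat) : (pvF n).length = n := by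
  induction n with
  | zero => simp [pvF]
  | succ n ih => simp [pvF, ih]

-- ===== A-side: inner loop fills block k+1 from offset s, stopping at length n =====
lemma pvAInner_spec (n : Nat) (js : List Int) (k : Nat) :
    ∀ s : Nat, pvT k ≤ s → s < n → s + js.length = pvT (k + 1) →
    pvAInner ((n : Nat) : Int) (((k + 1 : Nat) : Nat) : Int) js (pvF s) =
      (if n ≤ pvT (k + 1) then (pvF n, true) else (pvF (pvT (k + 1)), false)) := by
  induction js with
  | nil =>
    intro s h1 h2 h3
    simp only [List.length_nil, Nat.add_zero] at h3
    subst h3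
    rw [if_neg (by omega)]
    rfl
  | cons j js ih =>
    intro s h1 h2 h3
    have hg : pvG (s + 1) = k + 1 := pvG_block k s h1 (by simp at h3; omega)
    have hseq : pvF s ++ [((k + 1 : Nat) : Int)] = pvF (s + 1) := by
      simp [pvF, hg]
    simp only [pvAInner, hseq, pvF_length]
    by_cases hn : s + 1 = n
    · rw [if_pos (by exact_mod_cast hn)]
      rw [if_pos (by simp at h3; omega), hn]
    · rw [if_neg (by intro h; exact hn (by exact_mod_cast h))]
      have := ih (s + 1) (by omega) (by omega) (by simp at h3 ⊢; omega)
      exact this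

-- ===== A-side: outer loop from block k+1, sequence already = pvF (pvT k) =====
lemma pvAOuter_spec (n : Nat) : ∀ (c k : Nat), k + c = n → pvT k < n →
    pvAOuter ((n : Nat) : Int)
      (PySem.List.pyRange (((k + 1 : Nat) : Nat) : Int) ((n : Int) + 1) 1)
      (pvF (pvT k)) = pvF n := by
  intro c
  induction c with
  | zero =>
    intro k hk hlt
    have := pvT_ge k; omega
  | succ c ih =>
    intro k hk hlt
    have hkn : k < n := by have := pvT_ge k; omega
    rw [PySem.List.pyRange_one_cons (by exact_mod_cast Nat.succ_lt_succ hkn)]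
    simp only [pvAOuter]
    have hlen : (PySem.List.pyRange 0 ((k + 1 : Nat) : Int) 1).length = k + 1 := by
      rw [PySem.List.length_pyRange_one]; simp
    have hin := pvAInner_spec n (PySem.List.pyRange 0 ((k + 1 : Nat) : Int) 1) k (pvT k)
      (le_refl _) hlt (by rw [hlen]; rfl)
    rw [hin]
    by_cases hn : n ≤ pvT (k + 1)
    · rw [if_pos hn]
    · rw [if_neg hn]
      have : ((k + 1 : Nat) : Int) + 1 = ((k + 2 : Nat) : Int) := by push_cast; ring
      rw [this]
      exact ih (k + 1) (by omega) (by omega)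

-- ===== B-side: the single pass from position p with current value pvG p =====
lemma pvBGo_spec (n : Nat) : ∀ (c p : Nat), p + c = n →
    pvBGo (PySem.List.pyRange ((p : Nat) : Int) ((n : Nat) : Int) 1) (pvF p) ((pvG p : Nat) : Int) =
      pvF n := by
  intro c
  induction c with
  | zero =>
    intro p hp
    have : p = n := by omega
    subst this
    rw [PySem.List.pyRange_one_eq_nil (le_refl _)]
    rfl
  | succ c ih =>
    intro p hp
    have hpn : p < n := by omega
    rw [PySem.List.pyRange_one_cons (by exact_mod_cast hpn)]
    simp only [pvBGo]
    have hcond : ((pvG p : Nat) : Int) * (((pvG p : Nat) : Int) + 1) < 2 * (((p : Nat) : Int) + 1)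
        ↔ pvG p * (pvG p + 1) < 2 * (p + 1) := by
      constructor <;> intro h <;> exact_mod_cast h
    have hstep : (if ((pvG p : Nat) : Int) * (((pvG p : Nat) : Int) + 1) < 2 * (((p : Nat) : Int) + 1)
        then ((pvG p : Nat) : Int) + 1 else ((pvG p : Nat) : Int)) = ((pvG (p + 1) : Nat) : Int) := by
      by_cases h : pvG p * (pvG p + 1) < 2 * (p + 1)
      · rw [if_pos (hcond.mpr h)]; simp [pvG, h]
      · rw [if_neg (fun hh => h (hcond.mp hh))]; simp [pvG, h]
    rw [hstep]
    have hseqF : pvF p ++ [((pvG (p + 1) : Nat) : Int)] = pvF (p + 1) := by simp [pvF]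
    rw [hseqF]
    have : ((p : Nat) : Int) + 1 = ((p + 1 : Nat) : Int) := by push_cast; ring
    rw [this]
    exact ih (p + 1) (by omega)

lemma pvA_eq_pvF (length : Int) : get_strange_sequence length = pvF length.toNat := by
  unfold get_strange_sequence
  by_cases h : length ≤ 0
  · rw [PySem.List.pyRange_one_eq_nil (by omega)]
    have : length.toNat = 0 := by omega
    rw [this]; rfl
  · set n := length.toNat with hn
    have hl : length = (n : Int) := by omega
    have hn1 : 1 ≤ n := by omega
    have h0 := pvAOuter_spec n n 0 (by omega) (by simp [pvT]; omega)
    simp only [pvT, pvF] at h0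
    rw [hl]
    have : ((0 + 1 : Nat) : Int) = (1 : Int) := by norm_num
    rw [this] at h0
    exact h0

lemma pvB_eq_pvF (length : Int) : get_strange_sequence_alt length = pvF length.toNat := by
  unfold get_strange_sequence_alt
  by_cases h : length ≤ 0
  · rw [PySem.List.pyRange_one_eq_nil (by omega)]
    have : length.toNat = 0 := by omega
    rw [this]; rfl
  · set n := length.toNat with hn
    have hl : length = (n : Int) := by omega
    have h0 := pvBGo_spec n n 0 (by omega)
    simp only [pvF, pvG] at h0
    rw [hl]
    have : ((0 : Nat) : Int) = (0 : Int) := by norm_num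
    rw [this] at h0
    simpa using h0

-- ===== VERDICT (by name: the statement is the Claim_ definition above) =====
theorem get_strange_sequence_spec : Claim_equal_get_strange_sequence := by
  intro length _
  unfold Spec_get_strange_sequence
  rw [pvA_eq_pvF, pvB_eq_pvF]
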